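-- pv_equiv track=rewrite | github.com/sign-language-translator/sign-language-translator | sign_language_translator/text/utils.py | concatenate_sentence_terminals
-- ===== SOURCE A (Python) =====
-- from typing import Any, Iterable, List, Optional, Set, Tuple, Union
--
-- def concatenate_sentence_terminals(sentences: List, start_token, end_token):
--     """
--     Inserts start and end tokens between the sentences the input list and
--     concatenates them to the sentences (useful when the input is coming from a sentence tokenizer.)
--
--     This function takes a list of sentences and adds a start token to the beginning
--     of each sentence except the first and an end token to the end of each sentence except the last.
--
--     Parameters:
--         sentences (List): A list of sentences to be processed.
--             Sentences can be strings or list of tokens or any type but it must support + operator for concatenation.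
--         start_token: The token to be added at the start of sentences. Must be same type as a sentence.
--         end_token: The token to be added at the end of sentences. Must be same type as a sentence.
--
--     Returns:
--         List: A new list of sentences with start and end tokens inserted.
--
--     Example:
--
--     .. code-block:: python
--
--         sentences = ["Hello!", "How are you?", "Goodbye."]
--         start_token = "<start>"
--         end_token = "<end>"
--         result = concatenate_sentence_terminals(sentences, start_token, end_token)
--         # Output: ["Hello!<end>", "<start>How are you?<end>", "<start>Goodbye."]
--     """
--
--     new_sentences = []
--     for i, sentence in enumerate(sentences):
--         if i > 0:
--             sentence = start_token + sentence
--         if i < len(sentences) - 1: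
--             sentence = sentence + end_token
--         new_sentences.append(sentence)
--
--     return new_sentences
-- ===== SOURCE B (Python) =====
-- def concatenate_sentence_terminals(sentences, start_token, end_token):
--     if len(sentences) <= 1:
--         return list(sentences)
--     first = sentences[0] + end_token
--     middle = [start_token + s + end_token for s in sentences[1:-1]]
--     last = start_token + sentences[-1]
--     return [first] + middle + [last]
-- ===== Notes on version B (the rewrite author's own statement) =====
-- stated objective: alternative
-- what changed: Replaces the single indexed loop with per-element position tests by a slice-based decomposition into first/middle/last roles (guarding the 0/1-element cases), so no index comparison happens per element.
import Mathlib
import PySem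

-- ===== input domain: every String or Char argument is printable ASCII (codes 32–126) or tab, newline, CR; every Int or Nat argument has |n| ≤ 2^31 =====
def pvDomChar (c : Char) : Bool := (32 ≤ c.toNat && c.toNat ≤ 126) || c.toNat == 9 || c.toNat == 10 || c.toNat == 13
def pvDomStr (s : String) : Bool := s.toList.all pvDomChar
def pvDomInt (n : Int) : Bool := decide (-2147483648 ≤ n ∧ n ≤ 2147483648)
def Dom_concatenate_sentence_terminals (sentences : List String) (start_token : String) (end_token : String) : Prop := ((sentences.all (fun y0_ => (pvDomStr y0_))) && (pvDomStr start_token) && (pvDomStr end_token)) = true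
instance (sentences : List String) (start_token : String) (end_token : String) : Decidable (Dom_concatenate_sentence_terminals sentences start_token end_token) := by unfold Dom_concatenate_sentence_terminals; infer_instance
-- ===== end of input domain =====

-- B replaces A's indexed loop with per-element position tests by a slice-based
-- first/middle/last decomposition; same O(n) cost, different structure.

-- ===== PORT A =====
-- literal port of A's enumerate loop: append to new_sentences, two index tests per element
def concatenate_sentence_terminals (sentences : List String) (start_token : String) (end_token : String) : List String :=
  (PySem.List.enumerate sentences 0).foldl
    (fun new_sentences p =>
      let sentence := if p.1 > 0 then start_token ++ p.2 else p.2
      let sentence := if p.1 < (sentences.length : Int) - 1 then sentence ++ end_token else sentence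
      new_sentences ++ [sentence])
    []

-- ===== PORT B =====
-- literal port of Source B: guard len ≤ 1, then first = s[0]+end, middle over s[1:-1], last = start+s[-1]
def concatenate_sentence_terminals_alt (sentences : List String) (start_token : String) (end_token : String) : List String :=
  if sentences.length ≤ 1 then sentences
  else
    match sentences with
    | [] => []  -- unreachable: the guard ensures sentences has ≥ 2 elements
    | s0 :: rest =>
      let first := s0 ++ end_token   -- sentences[0] + end_token
      let middle := (PySem.List.slice sentences (some 1) (some (-1))).map
        (fun s => start_token ++ s ++ end_token)
      let last := start_token ++ rest.getLastD s0   -- start_token + sentences[-1]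
      [first] ++ middle ++ [last]

-- ===== PRECONDITION & SPEC =====
def Spec_concatenate_sentence_terminals (sentences : List String) (start_token : String) (end_token : String) (out : List String) : Prop := out = concatenate_sentence_terminals_alt sentences start_token end_token
instance (sentences : List String) (start_token : String) (end_token : String) (out : List String) : Decidable (Spec_concatenate_sentence_terminals sentences start_token end_token out) := by unfold Spec_concatenate_sentence_terminals; infer_instance

-- ===== CLAIM (what is proved, stated in full; the proofs are below) =====
def Claim_equal_concatenate_sentence_terminals : Prop := ∀ (sentences : List String) (start_token : String) (end_token : String), Dom_concatenate_sentence_terminals sentences start_token end_token → Spec_concatenate_sentence_terminals sentences start_token end_token (concatenate_sentence_terminals sentences start_token end_token)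

-- ===== LEMMAS AND PROOFS =====

-- the per-element function of A's loop, named so it can be rewritten
def gA (st en : String) (n : Int) (p : Int × String) : String :=
  let s := if p.1 > 0 then st ++ p.2 else p.2
  if p.1 < n - 1 then s ++ en else s

-- appending-fold is a map
theorem foldl_append_singleton_eq_map {α β : Type} (g : α → β) :
    ∀ (l : List α) (acc : List β),
      l.foldl (fun a x => a ++ [g x]) acc = acc ++ l.map g := by
  intro l
  induction l with
  | nil => simp
  | cons x xs ih => intro acc; simp [List.foldl, ih]

-- A's loop, as a map of gA over the enumerated list
theorem portA_eq_map (sentences : List String) (st en : String) :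
    concatenate_sentence_terminals sentences st en
      = (PySem.List.enumerate sentences 0).map (gA st en (sentences.length : Int)) := by
  unfold concatenate_sentence_terminals
  exact (foldl_append_singleton_eq_map (gA st en (sentences.length : Int))
    (PySem.List.enumerate sentences 0) []).trans (List.nil_append _)

-- the slice sentences[1:-1]
theorem slice_one_neg_one {α : Type} (xs : List α) :
    PySem.List.slice xs (some 1) (some (-1)) = xs.tail.dropLast := by
  cases xs with
  | nil => rfl
  | cons y ys =>
    simp [PySem.List.slice, PySem.List.clampIdx, List.dropLast_eq_take]
    split <;> omega

theorem getLast?_getD_cons {α : Type} (y : α) (l : List α) (d : α) :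
    (y :: l).getLast?.getD d = l.getLast?.getD y := by
  cases l with
  | nil => rfl
  | cons z zs =>
    rw [List.getLast?_cons_cons]
    obtain ⟨v, hv⟩ := Option.isSome_iff_exists.mp
      (List.getLast?_isSome.mpr (List.cons_ne_nil z zs))
    simp [hv]

-- A's tail part (indices ≥ 1): "start++s++end on all but the last, start++last on the last"
theorem tail_part (st en : String) (n : Int) :
    ∀ (l : List String) (x : String) (k : Int), 1 ≤ k → k + 1 + l.length = n →
      (PySem.List.enumerate (x :: l) k).map (gA st en n)
        = (x :: l).dropLast.map (fun s => st ++ s ++ en) ++ [st ++ l.getLastD x] := by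
  intro l
  induction l with
  | nil =>
    intro x k hk hn
    simp only [List.length_nil, Nat.cast_zero, add_zero] at hn
    have h0 : k > 0 := by omega
    have h1 : ¬ (k < n - 1) := by omega
    simp [PySem.List.enumerate_cons, PySem.List.enumerate_nil, gA, h0, h1]
  | cons y ys ih =>
    intro x k hk hn
    have hn' : (k + 1) + 1 + (ys.length : Int) = n := by
      simp [List.length_cons] at hn; omega
    rw [PySem.List.enumerate_cons, List.map_cons, ih y (k + 1) (by omega) hn']
    have h0 : k > 0 := by omega
    have h1 : k < n - 1 := by omega
    rw [List.dropLast_cons_of_ne_nil (List.cons_ne_nil y ys), List.map_cons,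
      List.getLastD_cons]
    simp [gA, h0, h1]

theorem concat_eq (sentences : List String) (st en : String) :
    concatenate_sentence_terminals sentences st en
      = concatenate_sentence_terminals_alt sentences st en := by
  rw [portA_eq_map]
  match sentences with
  | [] => rfl
  | [a] =>
    simp [concatenate_sentence_terminals_alt,
      PySem.List.enumerate_cons, PySem.List.enumerate_nil, gA]
  | a :: b :: rest =>
    have hg : ¬ ((a :: b :: rest : List String).length ≤ 1) := by
      simp [List.length_cons]
    have hn : (1 : Int) + 1 + (rest.length : Int) = ((a :: b :: rest).length : Int) := by
      simp [List.length_cons]; omega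
    rw [PySem.List.enumerate_cons, List.map_cons]
    simp only [zero_add]
    rw [tail_part st en ((a :: b :: rest).length : Int) rest b 1 (le_refl 1) hn]
    unfold concatenate_sentence_terminals_alt
    rw [if_neg hg, slice_one_neg_one, List.tail_cons]
    simp [gA]
    exact (getLast?_getD_cons b rest a).symm

-- ===== VERDICT (by name: the statement is the Claim_ definition above) =====
theorem concatenate_sentence_terminals_spec : Claim_equal_concatenate_sentence_terminals := by
  intro sentences st en _
  unfold Spec_concatenate_sentence_terminals
  exact concat_eq sentences st en
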